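-- pv_equiv track=rewrite | github.com/CesarPZ/BioInformatica_Tp_Final | src/TP_Bioinformatica.py | hay_stop
-- ===== SOURCE A (Python) =====
-- def dividir_3(cadena):
--     lista_nueva = []
--     for i in range(0, len(cadena), 3):
--         lista_nueva.append(cadena[i:i+3])
--
--     return lista_nueva
--
-- def hay_stop(secuencia):
--     lista = dividir_3(secuencia)
--     res = False
--     stops = ['UAA', 'UAG', 'UGA', 'TAA' , 'TAG', 'TGA']
--
--     for i in stops:
--         if i in lista[:-1]:
--             res = True
--     return res
-- ===== SOURCE B (Python) =====
-- STOPS = {'UAA', 'UAG', 'UGA', 'TAA', 'TAG', 'TGA'}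
--
-- def hay_stop(secuencia):
--     codones = [secuencia[i:i+3] for i in range(0, len(secuencia), 3)]
--     return any(c in STOPS for c in codones[:-1])
-- ===== Notes on version B (the rewrite author's own statement) =====
-- stated objective: idiomatic
-- what changed: Inverts the traversal: instead of looping over the 6 stop patterns and scanning the codon list for each (no early exit), B builds the codon list once and iterates over the non-final codons testing membership in a stop-codon set, returning True at the first hit.
import Mathlib
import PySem

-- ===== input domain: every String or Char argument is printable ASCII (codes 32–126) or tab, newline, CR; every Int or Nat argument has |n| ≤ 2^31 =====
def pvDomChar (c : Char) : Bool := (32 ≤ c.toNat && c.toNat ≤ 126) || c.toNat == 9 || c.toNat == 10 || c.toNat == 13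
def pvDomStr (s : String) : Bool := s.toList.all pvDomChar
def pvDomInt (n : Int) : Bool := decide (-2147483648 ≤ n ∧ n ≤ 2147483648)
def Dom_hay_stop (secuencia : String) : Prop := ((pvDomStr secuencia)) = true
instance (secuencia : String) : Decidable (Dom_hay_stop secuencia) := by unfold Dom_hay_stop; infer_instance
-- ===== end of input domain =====

-- B iterates once over the non-final codons with membership in a stop-codon set and early exit,
-- instead of A's loop over the 6 stop patterns each scanning the codon list (idiomatic; return value only).

-- ===== PORT A =====
def dividir_3 (cadena : String) : List String :=
  (PySem.List.pyRange 0 (PySem.Str.len cadena) 3).foldl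
    (fun lista_nueva i => lista_nueva ++ [PySem.Str.slice cadena (some i) (some (i + 3))]) []

def hay_stop (secuencia : String) : Bool :=
  let lista := dividir_3 secuencia
  let stops : List String := ["UAA", "UAG", "UGA", "TAA", "TAG", "TGA"]
  stops.foldl (fun res i => if (PySem.List.slice lista none (some (-1))).contains i then true else res) false

-- ===== PORT B =====
def pvSTOPS : PySem.Set String := PySem.Set.ofList ["UAA", "UAG", "UGA", "TAA", "TAG", "TGA"]

def hay_stop_alt (secuencia : String) : Bool :=
  let codones := (PySem.List.pyRange 0 (PySem.Str.len secuencia) 3).map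
    (fun i => PySem.Str.slice secuencia (some i) (some (i + 3)))
  (PySem.List.slice codones none (some (-1))).any (fun c => PySem.Set.contains pvSTOPS c)

-- ===== PRECONDITION & SPEC =====
def Spec_hay_stop (secuencia : String) (out : Bool) : Prop := out = hay_stop_alt secuencia
instance (secuencia : String) (out : Bool) : Decidable (Spec_hay_stop secuencia out) := by unfold Spec_hay_stop; infer_instance

-- ===== CLAIM (what is proved, stated in full; the proofs are below) =====
def Claim_equal_hay_stop : Prop := ∀ (secuencia : String), Dom_hay_stop secuencia → Spec_hay_stop secuencia (hay_stop secuencia)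

-- ===== LEMMAS AND PROOFS =====

-- A's append-loop builds the same codon list as B's map.
theorem foldl_append_singleton_eq_map {α β : Type} (f : α → β) (l : List α) (acc : List β) :
    l.foldl (fun a i => a ++ [f i]) acc = acc ++ l.map f := by
  induction l generalizing acc with
  | nil => simp
  | cons x xs ih => simp [List.foldl_cons, ih, List.append_assoc]

-- A's fold over the stop patterns is true iff some stop occurs in L.
theorem foldl_mem_eq_any {α : Type} [BEq α] (stops : List α) (L : List α) (b : Bool) :
    stops.foldl (fun res i => if L.contains i then true else res) b
      = (b || stops.any (fun i => L.contains i)) := by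
  induction stops generalizing b with
  | nil => simp
  | cons x xs ih =>
    simp only [List.foldl_cons, List.any_cons, ih]
    by_cases h : L.contains x = true <;> simp [h]

theorem pvSTOPS_contains_iff (c : String) :
    PySem.Set.contains pvSTOPS c = true ↔ c ∈ ["UAA", "UAG", "UGA", "TAA", "TAG", "TGA"] := by
  simp [pvSTOPS, PySem.Set.contains, PySem.Set.ofList]

theorem hay_stop_spec : Claim_equal_hay_stop := by
  intro secuencia _
  unfold Spec_hay_stop hay_stop hay_stop_alt dividir_3
  rw [foldl_append_singleton_eq_map, List.nil_append, foldl_mem_eq_any, Bool.false_or]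
  rw [Bool.eq_iff_iff]
  simp only [List.any_eq_true, List.contains_iff_mem]
  simp only [pvSTOPS_contains_iff]
  exact ⟨fun ⟨s, hs, hm⟩ => ⟨s, hm, hs⟩, fun ⟨c, hc, hs⟩ => ⟨c, hs, hc⟩⟩
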